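-- pv_equiv track=rewrite | github.com/lXlMeteor/One_plus | Component/component_blackjack_game.py | dealer_score_cal
-- ===== SOURCE A (Python) =====
-- def dealer_score_cal(s_list):
--     s_list.sort(reverse=True)
--     score = 0
--     for s in s_list:
--         if 2 <= s and s <= 9:
--             score += s
--         elif s >= 10:
--             score += 10
--         elif s == 1:
--             if score + 11 >= 17:
--                 score += 1
--             else:
--                 score += 11
--     return score
-- ===== SOURCE B (Python) =====
-- def dealer_score_cal(s_list):
--     # One pass: sum non-ace contributions and count aces, then settle aces
--     # with a closed form (at most one ace can count as 11).
--     # Note: A sorts s_list in place; B does not mutate its argument.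
--     total = 0
--     aces = 0
--     for s in s_list:
--         if 2 <= s <= 9:
--             total += s
--         elif s >= 10:
--             total += 10
--         elif s == 1:
--             aces += 1
--     if aces != 0:
--         if total < 6:
--             total += 11 + (aces - 1)
--         else:
--             total += aces
--     return total
-- ===== Notes on version B (the rewrite author's own statement) =====
-- stated objective: alternative
-- what changed: Replaces A's sort-then-stateful-scan by a single unsorted pass that sums non-ace contributions and counts aces, settling the aces afterwards with a closed form (at most one ace can count as 11); B does not mutate s_list (A sorts it in place).
import Mathlib
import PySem

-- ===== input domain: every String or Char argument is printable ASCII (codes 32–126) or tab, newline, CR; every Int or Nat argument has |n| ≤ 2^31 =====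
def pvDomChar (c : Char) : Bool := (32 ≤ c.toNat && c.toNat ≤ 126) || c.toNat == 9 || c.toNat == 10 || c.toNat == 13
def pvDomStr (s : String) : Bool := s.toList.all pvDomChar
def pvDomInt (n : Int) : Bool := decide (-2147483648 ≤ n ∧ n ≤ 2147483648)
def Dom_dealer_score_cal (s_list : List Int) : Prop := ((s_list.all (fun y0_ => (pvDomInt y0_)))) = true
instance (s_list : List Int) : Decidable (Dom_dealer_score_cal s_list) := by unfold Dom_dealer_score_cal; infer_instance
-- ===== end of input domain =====

-- B replaces A's sort-then-stateful-scan by a single unsorted pass (sum non-aces,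
-- count aces) plus a closed-form ace settlement: no sort, a different algorithm.
-- Equivalence is about the RETURN value only: A sorts s_list in place, B does not mutate it.

-- ===== PORT A =====
def dealerStepA (score s : Int) : Int :=
  if 2 ≤ s ∧ s ≤ 9 then score + s
  else if s ≥ 10 then score + 10
  else if s = 1 then (if score + 11 ≥ 17 then score + 1 else score + 11)
  else score

def dealer_score_cal (s_list : List Int) : Int :=
  (PySem.List.sorted s_list (fun x => x) true).foldl dealerStepA 0

-- ===== PORT B =====
def dealerStepB (acc : Int × Int) (s : Int) : Int × Int :=
  if 2 ≤ s ∧ s ≤ 9 then (acc.1 + s, acc.2)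
  else if s ≥ 10 then (acc.1 + 10, acc.2)
  else if s = 1 then (acc.1, acc.2 + 1)
  else acc

def dealer_score_cal_alt (s_list : List Int) : Int :=
  let p := s_list.foldl dealerStepB (0, 0)
  if p.2 ≠ 0 then (if p.1 < 6 then p.1 + 11 + (p.2 - 1) else p.1 + p.2) else p.1

-- ===== PRECONDITION & SPEC =====
def Spec_dealer_score_cal (s_list : List Int) (out : Int) : Prop := out = dealer_score_cal_alt s_list
instance (s_list : List Int) (out : Int) : Decidable (Spec_dealer_score_cal s_list out) := by unfold Spec_dealer_score_cal; infer_instance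

-- ===== CLAIM (what is proved, stated in full; the proofs are below) =====
def Claim_equal_dealer_score_cal : Prop := ∀ (s_list : List Int), Dom_dealer_score_cal s_list → Spec_dealer_score_cal s_list (dealer_score_cal s_list)

-- ===== LEMMAS AND PROOFS =====

-- the score contribution of one non-ace card
def cardVal (s : Int) : Int := if 2 ≤ s ∧ s ≤ 9 then s else if s ≥ 10 then 10 else 0

lemma foldB_char (L : List Int) : ∀ a b : Int,
    L.foldl dealerStepB (a, b) = (a + (L.map cardVal).sum, b + (L.count 1 : Int)) := by
  induction L with
  | nil => intro a b; simp
  | cons s L ih =>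
    intro a b
    by_cases h1 : 2 ≤ s ∧ s ≤ 9
    · have hne : s ≠ 1 := by omega
      simp [dealerStepB, h1, hne, ih, cardVal]
      ring
    · by_cases h2 : s ≥ 10
      · have hne : s ≠ 1 := by omega
        simp [dealerStepB, h1, h2, hne, ih, cardVal]
        ring
      · by_cases h3 : s = 1
        · simp [dealerStepB, h3, ih, cardVal]
          omega
        · simp [dealerStepB, h1, h2, h3, ih, cardVal]

lemma foldA_high (H : List Int) : ∀ a : Int, (∀ h ∈ H, 2 ≤ h) →
    H.foldl dealerStepA a = a + (H.map cardVal).sum := by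
  induction H with
  | nil => intro a _; simp
  | cons s H ih =>
    intro a hmem
    have hs : 2 ≤ s := hmem s (by simp)
    simp only [List.foldl_cons, dealerStepA, List.map_cons, List.sum_cons]
    by_cases h1 : 2 ≤ s ∧ s ≤ 9
    · rw [if_pos h1, ih _ (fun h hh => hmem h (by simp [hh]))]
      simp [cardVal, h1]; ring
    · have h2 : s ≥ 10 := by omega
      rw [if_neg h1, if_pos h2, ih _ (fun h hh => hmem h (by simp [hh]))]
      simp [cardVal, h1, h2]; ring

lemma foldA_aces (k : Nat) : ∀ a : Int, 0 ≤ a →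
    (List.replicate k (1 : Int)).foldl dealerStepA a =
      if k = 0 then a else if a ≥ 6 then a + k else a + 11 + ((k : Int) - 1) := by
  induction k with
  | zero => intro a _; simp
  | succ k ih =>
    intro a ha
    rw [List.replicate_succ, List.foldl_cons]
    have hstep : dealerStepA a 1 = if a + 11 ≥ 17 then a + 1 else a + 11 := by
      unfold dealerStepA
      rw [if_neg (by omega), if_neg (by omega), if_pos rfl]
    rw [hstep]
    by_cases h : a + 11 ≥ 17
    · rw [if_pos h, ih _ (by omega)]
      rw [if_neg (by omega : ¬ (k + 1) = 0), if_pos (by omega : a ≥ 6)]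
      rcases Nat.eq_zero_or_pos k with hk | hk
      · subst hk; simp
      · rw [if_neg (by omega : ¬ k = 0), if_pos (by omega : a + 1 ≥ 6)]
        push_cast; ring
    · rw [if_neg h, ih _ (by omega)]
      rw [if_neg (by omega : ¬ (k + 1) = 0), if_neg (by omega : ¬ a ≥ 6)]
      rcases Nat.eq_zero_or_pos k with hk | hk
      · subst hk; norm_num
      · rw [if_neg (by omega : ¬ k = 0), if_pos (by omega : a + 11 ≥ 6)]
        push_cast; ring

lemma foldA_low (T : List Int) : ∀ a : Int, (∀ t ∈ T, t ≤ 0) →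
    T.foldl dealerStepA a = a := by
  induction T with
  | nil => intro a _; rfl
  | cons s T ih =>
    intro a hmem
    have hs : s ≤ 0 := hmem s (by simp)
    have h1 : ¬ (2 ≤ s ∧ s ≤ 9) := by omega
    have h2 : ¬ s ≥ 10 := by omega
    have h3 : s ≠ 1 := by omega
    simp only [List.foldl_cons, dealerStepA, if_neg h1, if_neg h2, if_neg h3]
    exact ih a (fun t ht => hmem t (by simp [ht]))

-- a descending list splits into its ≥2 part, its 1s and its ≤0 part
lemma desc_split (L : List Int) (hp : L.Pairwise (fun a b => b ≤ a)) :
    L = L.filter (fun s => 2 ≤ s) ++ List.replicate (L.count 1) 1 ++ L.filter (fun s => s ≤ 0) := by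
  induction L with
  | nil => simp
  | cons s L ih =>
    have hL := (List.pairwise_cons.mp hp).2
    have hall := (List.pairwise_cons.mp hp).1
    have ihL := ih hL
    by_cases h1 : 2 ≤ s
    · have hs0 : ¬ (decide (s ≤ 0) = true) := by simp; omega
      have hne : s ≠ 1 := by omega
      simp only [List.filter_cons, List.count_cons]
      simp [h1, hne, hs0]
      simp only [← List.append_assoc]
      exact ihL
    · by_cases h2 : s = 1
      · subst h2
        have hnone : L.filter (fun s => decide (2 ≤ s)) = [] := by
          rw [List.filter_eq_nil_iff]
          intro x hx
          have := hall x hx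
          simp; omega
        have hnone' : (1 : Int) :: L = List.replicate ((1 :: L).count 1) 1 ++ L.filter (fun s => s ≤ 0) := by
          have : ((1 : Int) :: L).count 1 = L.count 1 + 1 := by simp
          rw [this, List.replicate_succ, List.cons_append]
          congr 1
          calc L = L.filter (fun s => decide (2 ≤ s)) ++ List.replicate (L.count 1) 1 ++ L.filter (fun s => s ≤ 0) := ihL
            _ = List.replicate (L.count 1) 1 ++ L.filter (fun s => s ≤ 0) := by rw [hnone]; simp
        have hnone2 : ((1 : Int) :: L).filter (fun s => decide (2 ≤ s)) = [] := by
          rw [List.filter_eq_nil_iff]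
          intro x hx
          rcases List.mem_cons.mp hx with h | h
          · subst h; simp
          · have := hall x h; simp; omega
        rw [hnone2, List.nil_append]
        exact hnone'
      · -- s ≤ 0
        have hs0 : s ≤ 0 := by omega
        have hallL : ∀ x ∈ L, x ≤ 0 := fun x hx => le_trans (hall x hx) hs0
        have hfT : L.filter (fun s => decide (s ≤ 0)) = L := by
          rw [List.filter_eq_self]
          intro x hx; simp [hallL x hx]
        have hf2 : ((s : Int) :: L).filter (fun s => decide (2 ≤ s)) = [] := by
          rw [List.filter_eq_nil_iff]
          intro x hx
          rcases List.mem_cons.mp hx with h | h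
          · subst h; simp; omega
          · have := hallL x h; simp; omega
        have hc : ((s : Int) :: L).count 1 = 0 := by
          rw [List.count_eq_zero]
          intro hmem
          rcases List.mem_cons.mp hmem with h | h
          · omega
          · have := hallL 1 h; omega
        rw [hf2, hc, List.nil_append]
        simp only [List.replicate_zero, List.nil_append, List.filter_cons]
        have : decide (s ≤ 0) = true := by simp [hs0]
        simp [this, hfT]

lemma cardVal_one : cardVal 1 = 0 := by simp [cardVal]

lemma sum_filter_low (L : List Int) : ((L.filter (fun s => s ≤ 0)).map cardVal).sum = 0 := by
  apply List.sum_eq_zero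
  intro x hx
  rcases List.mem_map.mp hx with ⟨t, ht, rfl⟩
  have := List.of_mem_filter ht
  simp at this
  simp [cardVal]; omega

-- ===== VERDICT (by name: the statement is the Claim_ definition above) =====
theorem dealer_score_cal_spec : Claim_equal_dealer_score_cal := by
  intro L _
  unfold Spec_dealer_score_cal dealer_score_cal dealer_score_cal_alt
  set S := PySem.List.sorted L (fun x => x) true with hS
  have hperm : S.Perm L := PySem.List.sorted_perm L (fun x => x) true
  have hpair : S.Pairwise (fun a b => b ≤ a) := PySem.List.sorted_pairwise_rev L (fun x => x)
  have hsplit := desc_split S hpair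
  set H := S.filter (fun s => 2 ≤ s) with hH
  set T := S.filter (fun s => s ≤ 0) with hT
  set k := S.count 1 with hk
  -- evaluate A's fold on the decomposition
  have hAmem : ∀ h ∈ H, 2 ≤ h := by
    intro h hh
    have := List.of_mem_filter hh
    simpa using this
  have hTmem : ∀ t ∈ T, t ≤ 0 := by
    intro t ht
    have := List.of_mem_filter ht
    simpa using this
  have hA : S.foldl dealerStepA 0 =
      if k = 0 then (H.map cardVal).sum
      else if (H.map cardVal).sum ≥ 6 then (H.map cardVal).sum + k
      else (H.map cardVal).sum + 11 + ((k : Int) - 1) := by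
    conv_lhs => rw [hsplit]
    rw [List.foldl_append, List.foldl_append]
    rw [foldA_high H 0 hAmem]
    have hnn : 0 ≤ (H.map cardVal).sum := by
      apply List.sum_nonneg
      intro x hx
      rcases List.mem_map.mp hx with ⟨t, _, rfl⟩
      unfold cardVal
      split_ifs <;> omega
    rw [foldA_aces k _ (by simpa using hnn)]
    rw [foldA_low T _ hTmem]
    simp
  -- evaluate B's fold
  have hB := foldB_char L 0 0
  -- relate sums and counts through the permutation
  have hsum : (L.map cardVal).sum = (H.map cardVal).sum := by
    have h1 : (L.map cardVal).sum = (S.map cardVal).sum :=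
      (List.Perm.sum_eq ((hperm.map cardVal))).symm
    rw [h1]
    conv_lhs => rw [hsplit]
    simp only [List.map_append, List.sum_append]
    have h2 : ((List.replicate k (1 : Int)).map cardVal).sum = 0 := by
      simp [List.map_replicate, cardVal_one]
    rw [h2, sum_filter_low]
    ring
  have hcount : L.count 1 = k := (hperm.count_eq 1).symm
  rw [hB]
  simp only [hsum, hcount, hA]
  rcases Nat.eq_zero_or_pos k with h0 | h0
  · simp [h0]
  · have hne : k ≠ 0 := by omega
    have hne' : (0 : Int) + (k : Int) ≠ 0 := by positivity
    simp only [zero_add] at *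
    simp [hne]
    by_cases h6 : (H.map cardVal).sum ≥ 6
    · simp [h6, if_neg (by omega : ¬ (H.map cardVal).sum < 6)]
    · simp [if_pos (by omega : (H.map cardVal).sum < 6), if_neg h6]
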